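-- pv_equiv track=rewrite | github.com/zxc9221/attendance | mission1/attendance.py | get_attendance_info
-- ===== SOURCE A (Python) =====
-- def get_attendance_info(attendance_day_of_week):
--     attendance_infos = {}
--     for name, day_of_week in attendance_day_of_week:
--         if name not in attendance_infos:
--             attendance_infos[name] = {"point": 0, "wed" : 0, "weekend": 0}
--         if day_of_week == "wednesday":
--             attendance_infos[name]["point"] += 3
--             attendance_infos[name]["wed"] += 1
--         elif day_of_week in ["saturday", "sunday"]:
--             attendance_infos[name]["point"] += 2
--             attendance_infos[name]["weekend"] += 1
--         else:
--             attendance_infos[name]["point"] += 1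
--     return  attendance_infos
-- ===== SOURCE B (Python) =====
-- def get_attendance_info(attendance_day_of_week):
--     # group days by name (first-appearance order), then compute each record in closed form
--     groups = {}
--     for name, day_of_week in attendance_day_of_week:
--         groups.setdefault(name, []).append(day_of_week)
--     result = {}
--     for name, days in groups.items():
--         wed = days.count("wednesday")
--         weekend = days.count("saturday") + days.count("sunday")
--         point = 3 * wed + 2 * weekend + (len(days) - wed - weekend)
--         result[name] = {"point": point, "wed": wed, "weekend": weekend}
--     return result
-- ===== Notes on version B (the rewrite author's own statement) =====
-- stated objective: alternative
-- what changed: Replaces A's incremental per-row point/wed/weekend accumulation into a dict of dicts by a group-then-closed-form structure: first group the days per name (first-appearance order), then compute wed/weekend by counting and the point total by the closed form 3*wed + 2*weekend + (len - wed - weekend).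
import Mathlib
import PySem

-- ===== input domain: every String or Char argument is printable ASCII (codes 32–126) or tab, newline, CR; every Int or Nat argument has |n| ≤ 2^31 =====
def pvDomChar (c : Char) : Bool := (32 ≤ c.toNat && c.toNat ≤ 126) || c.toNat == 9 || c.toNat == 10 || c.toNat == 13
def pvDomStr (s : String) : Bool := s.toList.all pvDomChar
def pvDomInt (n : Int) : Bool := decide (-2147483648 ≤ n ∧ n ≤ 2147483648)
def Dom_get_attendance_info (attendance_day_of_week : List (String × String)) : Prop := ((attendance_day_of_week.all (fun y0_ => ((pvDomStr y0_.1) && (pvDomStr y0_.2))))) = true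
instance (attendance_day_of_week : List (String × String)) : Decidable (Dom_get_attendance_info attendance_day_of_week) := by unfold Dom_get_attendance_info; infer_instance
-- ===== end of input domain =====

-- B replaces A's incremental per-row accumulation by grouping the days per name first and
-- then computing each record in closed form (alternative decomposition, same cost).

-- ===== PORT A =====
-- the {"point": 0, "wed": 0, "weekend": 0} literal
def pvInitA : PySem.Dict String Int := PySem.Dict.ofList [("point", 0), ("wed", 0), ("weekend", 0)]

-- one loop iteration of A; Python mutates the inner dict in place, which re-inserting
-- the updated inner dict at the (already present) key reproduces exactly
def pvStepA (d : PySem.Dict String (PySem.Dict String Int)) (p : String × String) :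
    PySem.Dict String (PySem.Dict String Int) :=
  let d := if d.contains p.1 then d else d.insert p.1 pvInitA
  if p.2 == "wednesday" then
    d.insert p.1 (((d.getD p.1 PySem.Dict.empty).modify "point" 0 (· + 3)).modify "wed" 0 (· + 1))
  else if p.2 == "saturday" || p.2 == "sunday" then
    d.insert p.1 (((d.getD p.1 PySem.Dict.empty).modify "point" 0 (· + 2)).modify "weekend" 0 (· + 1))
  else
    d.insert p.1 ((d.getD p.1 PySem.Dict.empty).modify "point" 0 (· + 1))

def get_attendance_info (attendance_day_of_week : List (String × String)) :
    List (String × List (String × Int)) :=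
  ((attendance_day_of_week.foldl pvStepA PySem.Dict.empty).items).map (fun p => (p.1, p.2.items))

-- ===== PORT B =====
-- one record of Source B, computed in closed form from that name's day list
def pvRecordB (days : List String) : List (String × Int) :=
  let wed : Int := days.count "wednesday"
  let weekend : Int := (days.count "saturday" : Int) + days.count "sunday"
  let point : Int := 3 * wed + 2 * weekend + ((days.length : Int) - wed - weekend)
  [("point", point), ("wed", wed), ("weekend", weekend)]

def get_attendance_info_alt (attendance_day_of_week : List (String × String)) :
    List (String × List (String × Int)) :=
  let groups := attendance_day_of_week.foldl
    (fun d p => d.modify p.1 [] (· ++ [p.2])) PySem.Dict.empty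
  (groups.items.foldl (fun r p => r.insert p.1 (pvRecordB p.2)) PySem.Dict.empty).items

-- ===== PRECONDITION & SPEC =====
def Spec_get_attendance_info (attendance_day_of_week : List (String × String)) (out : List (String × List (String × Int))) : Prop := out = get_attendance_info_alt attendance_day_of_week
instance (attendance_day_of_week : List (String × String)) (out : List (String × List (String × Int))) : Decidable (Spec_get_attendance_info attendance_day_of_week out) := by unfold Spec_get_attendance_info; infer_instance

-- ===== CLAIM (what is proved, stated in full; the proofs are below) =====
def Claim_equal_get_attendance_info : Prop := ∀ (attendance_day_of_week : List (String × String)), Dom_get_attendance_info attendance_day_of_week → Spec_get_attendance_info attendance_day_of_week (get_attendance_info attendance_day_of_week)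

-- ===== LEMMAS AND PROOFS =====
-- A's inner-dict update for one day
def pvInner (inner : PySem.Dict String Int) (day : String) : PySem.Dict String Int :=
  if day == "wednesday" then (inner.modify "point" 0 (· + 3)).modify "wed" 0 (· + 1)
  else if day == "saturday" || day == "sunday" then
    (inner.modify "point" 0 (· + 2)).modify "weekend" 0 (· + 1)
  else inner.modify "point" 0 (· + 1)

-- the list of days recorded for name k, in input order
def pvDaysOf (k : String) (l : List (String × String)) : List String :=
  (l.filter (fun p => p.1 == k)).map (·.2)

theorem pvCondGetD (d : PySem.Dict String (PySem.Dict String Int)) (k : String) :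
    (if d.contains k then d else d.insert k pvInitA).getD k PySem.Dict.empty
      = (d.get? k).getD pvInitA := by
  by_cases hc : d.contains k = true
  · rw [if_pos hc]
    rw [PySem.Dict.contains_eq_isSome_get?] at hc
    cases hg : d.get? k with
    | none => rw [hg] at hc; simp at hc
    | some v => rw [PySem.Dict.getD_eq_get?_getD, hg]; rfl
  · have hc2 : d.contains k = false := by simpa using hc
    have hg : d.get? k = none := by
      rw [PySem.Dict.contains_eq_isSome_get?] at hc2
      cases hg : d.get? k with
      | none => rfl
      | some v => rw [hg] at hc2; simp at hc2
    rw [if_neg hc, hg]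
    simp [PySem.Dict.getD_insert_self]

theorem pvStepA_get_self (d : PySem.Dict String (PySem.Dict String Int)) (p : String × String) :
    (pvStepA d p).get? p.1 = some (pvInner ((d.get? p.1).getD pvInitA) p.2) := by
  unfold pvStepA pvInner
  rw [← pvCondGetD d p.1]
  split_ifs <;> simp [PySem.Dict.get?_insert_self]

theorem pvStepA_get_ne (d : PySem.Dict String (PySem.Dict String Int)) (p : String × String)
    (k : String) (hk : k ≠ p.1) : (pvStepA d p).get? k = d.get? k := by
  unfold pvStepA
  split_ifs <;> simp [PySem.Dict.get?_insert_of_ne, hk]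

theorem pvStepA_keys (d : PySem.Dict String (PySem.Dict String Int)) (p : String × String) :
    (pvStepA d p).keys = PySem.Set.add d.keys p.1 := by
  unfold pvStepA
  by_cases hc : d.contains p.1 = true
  · have hm : p.1 ∈ d.keys := (PySem.Dict.contains_iff_mem_keys d p.1).mp hc
    rw [if_pos hc]
    split_ifs <;> simp [PySem.Dict.keys_insert_of_contains, hc, PySem.Set.add_of_mem hm]
  · have hc2 : d.contains p.1 = false := by simpa using hc
    have hm : p.1 ∉ d.keys := fun h => by
      rw [(PySem.Dict.contains_iff_mem_keys d p.1).mpr h] at hc2; exact Bool.noConfusion hc2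
    rw [if_neg hc]
    split_ifs <;>
      simp [PySem.Dict.keys_insert_of_contains, PySem.Dict.contains_insert_self,
        PySem.Dict.keys_insert_of_not_contains, hc2, PySem.Set.add_of_not_mem hm]

theorem pvFoldA_keys (l : List (String × String)) (d : PySem.Dict String (PySem.Dict String Int)) :
    (l.foldl pvStepA d).keys = PySem.Set.update d.keys (l.map (·.1)) := by
  induction l generalizing d with
  | nil => simp [PySem.Set.update]
  | cons p l ih =>
      rw [List.foldl_cons, ih, pvStepA_keys, List.map_cons, PySem.Set.update_cons]

theorem pvFoldA_get? (l : List (String × String)) (d : PySem.Dict String (PySem.Dict String Int))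
    (k : String) :
    (l.foldl pvStepA d).get? k =
      (if d.contains k ∨ k ∈ l.map (·.1)
       then some ((pvDaysOf k l).foldl pvInner ((d.get? k).getD pvInitA)) else none) := by
  induction l generalizing d with
  | nil =>
      simp only [List.foldl_nil, List.map_nil, List.not_mem_nil, or_false, pvDaysOf,
        List.filter_nil]
      by_cases hc : d.contains k = true
      · rw [if_pos hc]
        rw [PySem.Dict.contains_eq_isSome_get?] at hc
        cases hg : d.get? k with
        | none => rw [hg] at hc; simp at hc
        | some v => rfl
      · have hc2 : d.contains k = false := by simpa using hc
        rw [if_neg hc]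
        rw [PySem.Dict.contains_eq_isSome_get?] at hc2
        cases hg : d.get? k with
        | none => rfl
        | some v => rw [hg] at hc2; simp at hc2
  | cons p l ih =>
      rw [List.foldl_cons, ih]
      by_cases hk : k = p.1
      · have hself := pvStepA_get_self d p
        have hcont : (pvStepA d p).contains p.1 = true := by
          rw [PySem.Dict.contains_eq_isSome_get?, hself]; rfl
        have hdays : pvDaysOf p.1 (p :: l) = p.2 :: pvDaysOf p.1 l := by
          simp [pvDaysOf]
        rw [hk, hself, hdays]
        simp [hcont]
      · have hne := pvStepA_get_ne d p k hk
        have hcont : (pvStepA d p).contains k = d.contains k := by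
          rw [PySem.Dict.contains_eq_isSome_get?, PySem.Dict.contains_eq_isSome_get?, hne]
        have hdays : pvDaysOf k (p :: l) = pvDaysOf k l := by
          have h2 : ¬ p.1 = k := fun h => hk h.symm
          simp [pvDaysOf, h2]
        simp only [hne, hcont, hdays, List.map_cons, List.mem_cons, hk, false_or]

theorem pvInner_mk (p w e : Int) (day : String) :
    pvInner (PySem.Dict.mk [("point", p), ("wed", w), ("weekend", e)]) day =
      PySem.Dict.mk
        [("point", p + if day = "wednesday" then 3
            else if day = "saturday" ∨ day = "sunday" then 2 else 1),
         ("wed", w + if day = "wednesday" then 1 else 0),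
         ("weekend", e + if day = "saturday" ∨ day = "sunday" then 1 else 0)] := by
  unfold pvInner
  split_ifs with h1 h2 <;>
    simp_all [PySem.Dict.modify, PySem.Dict.insert, PySem.Dict.getD, PySem.Dict.get?,
      PySem.Dict.contains]

theorem pvInnerFold (ds : List String) (p w e : Int) :
    ds.foldl pvInner (PySem.Dict.mk [("point", p), ("wed", w), ("weekend", e)]) =
      PySem.Dict.mk
        [("point", p + 3 * (ds.count "wednesday" : Int)
            + 2 * ((ds.count "saturday" : Int) + (ds.count "sunday" : Int))
            + ((ds.length : Int) - (ds.count "wednesday" : Int)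
                - ((ds.count "saturday" : Int) + (ds.count "sunday" : Int)))),
         ("wed", w + (ds.count "wednesday" : Int)),
         ("weekend", e + ((ds.count "saturday" : Int) + (ds.count "sunday" : Int)))] := by
  induction ds generalizing p w e with
  | nil => simp
  | cons day ds ih =>
      rw [List.foldl_cons, pvInner_mk, ih]
      by_cases h1 : day = "wednesday" <;> by_cases h2 : day = "saturday" <;>
        by_cases h3 : day = "sunday" <;>
        simp_all [PySem.Dict.mk.injEq] <;> omega

theorem pv_main (l : List (String × String)) :
    get_attendance_info l = get_attendance_info_alt l := by
  unfold get_attendance_info get_attendance_info_alt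
  have hkeysA : (l.foldl pvStepA (PySem.Dict.empty : PySem.Dict String (PySem.Dict String Int))).keys
      = PySem.Set.ofList (l.map (·.1)) := by
    rw [pvFoldA_keys, PySem.Dict.keys_empty, PySem.Set.update_nil_left]
  have hnodA : (l.foldl pvStepA (PySem.Dict.empty : PySem.Dict String (PySem.Dict String Int))).keys.Nodup := by
    rw [hkeysA]; exact PySem.Set.nodup_ofList _
  have hitemsA := PySem.Dict.items_eq_map_keys
    (l.foldl pvStepA (PySem.Dict.empty : PySem.Dict String (PySem.Dict String Int))) hnodA
    PySem.Dict.empty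
  have hkeysB : (l.foldl (fun d p => d.modify p.1 [] (· ++ [p.2]))
      (PySem.Dict.empty : PySem.Dict String (List String))).keys
      = PySem.Set.ofList (l.map (·.1)) := by
    rw [PySem.Dict.keys_foldl_modify_key, PySem.Dict.keys_empty, PySem.Set.update_nil_left]
  have hnodB : (l.foldl (fun d p => d.modify p.1 [] (· ++ [p.2]))
      (PySem.Dict.empty : PySem.Dict String (List String))).keys.Nodup := by
    rw [hkeysB]; exact PySem.Set.nodup_ofList _
  have hitemsB := PySem.Dict.items_eq_map_keys
    (l.foldl (fun d p => d.modify p.1 [] (· ++ [p.2]))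
      (PySem.Dict.empty : PySem.Dict String (List String))) hnodB []
  have hgd : ∀ k, (l.foldl (fun d p => d.modify p.1 [] (· ++ [p.2]))
      (PySem.Dict.empty : PySem.Dict String (List String))).getD k [] = pvDaysOf k l := by
    intro k
    rw [PySem.Dict.getD_foldl_modify_append, PySem.Dict.getD_empty]
    rfl
  have hfresh := PySem.Dict.items_foldl_insert_fresh
    (l := (l.foldl (fun d p => d.modify p.1 [] (· ++ [p.2]))
      (PySem.Dict.empty : PySem.Dict String (List String))).items)
    (k := fun p => p.1) (v := fun p => pvRecordB p.2)
    (d := (PySem.Dict.empty : PySem.Dict String (List (String × Int))))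
    (fun a _ => PySem.Dict.contains_empty _)
    (by exact hnodB)
  rw [hfresh, hitemsB, hitemsA, List.map_map, List.map_map, hkeysA, hkeysB]
  apply List.map_congr_left
  intro k hk
  have hkmem : k ∈ l.map (·.1) := (PySem.Set.mem_ofList _ _).mp hk
  have hget := pvFoldA_get? l PySem.Dict.empty k
  simp only [PySem.Dict.contains_empty, PySem.Dict.get?_empty, hkmem, or_true,
    Bool.false_eq_true, if_pos] at hget
  have hAval : (l.foldl pvStepA (PySem.Dict.empty : PySem.Dict String (PySem.Dict String Int))).getD
      k PySem.Dict.empty = (pvDaysOf k l).foldl pvInner pvInitA := by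
    rw [PySem.Dict.getD_eq_get?_getD, hget]; rfl
  have hinit : pvInitA = PySem.Dict.mk [("point", 0), ("wed", 0), ("weekend", 0)] := rfl
  simp only [Function.comp, hAval, hgd, hinit, pvInnerFold, pvRecordB,
    pvDaysOf]
  simp

-- ===== VERDICT (by name: the statement is the Claim_ definition above) =====
theorem get_attendance_info_spec : Claim_equal_get_attendance_info := by
  intro l _
  show get_attendance_info l = get_attendance_info_alt l
  exact pv_main l
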